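-- pv_equiv track=rewrite | github.com/Smily-Pirate/100DaysOfCode | Day35.py | sumVowel
-- ===== SOURCE A (Python) =====
-- def sumVowel(string):
--     n = len(string)
--     sum = 0
--     string = string.lower()
--
--     for i in range(0, n):
--         s = string[i]
--         if (s == "a" or s == "e" or s == "i" or s == "o" or s == "u"):
--             sum += ((n - i) * (i + 1))
--
--     return sum
-- ===== SOURCE B (Python) =====
-- def sumVowel(string):
--     # Running-count DP: total vowels over all contiguous substrings.
--     # cur = vowels (weighted by start choices) in substrings ending here.
--     total = 0
--     cur = 0
--     k = 0
--     for ch in string.lower():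
--         if ch in ('a', 'e', 'i', 'o', 'u'):
--             cur += k + 1
--         total += cur
--         k += 1
--     return total
-- ===== Notes on version B (the rewrite author's own statement) =====
-- stated objective: alternative
-- what changed: Replaces the closed-form weight (n-i)*(i+1) per vowel position with the substring-counting DP: a single pass keeps cur = weighted vowel contribution of substrings ending at the current index (cur += k+1 on a vowel) and accumulates total += cur, so no multiplication and no use of n.
import Mathlib
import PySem

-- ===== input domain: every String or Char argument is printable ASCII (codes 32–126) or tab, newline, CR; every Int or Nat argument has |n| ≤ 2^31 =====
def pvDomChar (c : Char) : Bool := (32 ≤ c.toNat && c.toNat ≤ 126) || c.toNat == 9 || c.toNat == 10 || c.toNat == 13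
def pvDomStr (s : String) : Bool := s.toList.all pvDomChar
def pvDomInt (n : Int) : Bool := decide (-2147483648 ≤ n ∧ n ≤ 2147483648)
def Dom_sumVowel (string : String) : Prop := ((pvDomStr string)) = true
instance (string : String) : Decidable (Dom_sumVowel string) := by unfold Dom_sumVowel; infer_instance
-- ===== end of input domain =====

-- B replaces A's per-position closed-form weight (n-i)*(i+1) by the substring-counting
-- running-sum DP (cur += k+1 on a vowel; total += cur each step); objective: alternative.

-- ===== PORT A =====
def sumVowel (string : String) : Int :=
  let n : Int := PySem.Str.len string
  let string2 := PySem.Str.lower string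
  (PySem.List.pyRange 0 n 1).foldl
    (fun sum i =>
      match PySem.Str.pyGet? string2 i with
      | some s =>
          if s = 'a' ∨ s = 'e' ∨ s = 'i' ∨ s = 'o' ∨ s = 'u' then
            sum + (n - i) * (i + 1)
          else sum
      | none => sum)  -- unreachable: i ∈ range(0, len(string)) is always a valid index
    0

-- ===== PORT B =====
def sumVowel_alt (string : String) : Int :=
  let st := (PySem.Str.lower string).toList.foldl
    (fun (st : Int × Int × Int) ch =>
      let total := st.1
      let cur := st.2.1
      let k := st.2.2
      let cur := if ch = 'a' ∨ ch = 'e' ∨ ch = 'i' ∨ ch = 'o' ∨ ch = 'u' then cur + k + 1 else cur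
      (total + cur, cur, k + 1))
    (0, 0, 0)
  st.1

-- ===== PRECONDITION & SPEC =====
def Spec_sumVowel (string : String) (out : Int) : Prop := out = sumVowel_alt string
instance (string : String) (out : Int) : Decidable (Spec_sumVowel string out) := by unfold Spec_sumVowel; infer_instance

-- ===== CLAIM (what is proved, stated in full; the proofs are below) =====
def Claim_equal_sumVowel : Prop := ∀ (string : String), Dom_sumVowel string → Spec_sumVowel string (sumVowel string)

-- ===== LEMMAS AND PROOFS =====

-- common value: Σ over vowel positions (at global index k + offset) of (k+1) * (suffix length at that position)
def gAux : Int → List Char → Int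
  | _, [] => 0
  | k, c :: t =>
      (if c = 'a' ∨ c = 'e' ∨ c = 'i' ∨ c = 'o' ∨ c = 'u' then ((t.length : Int) + 1) * (k + 1) else 0)
        + gAux (k + 1) t

theorem alt_foldl_eq (t : List Char) : ∀ (total cur k : Int),
    (t.foldl
      (fun (st : Int × Int × Int) ch =>
        let total := st.1
        let cur := st.2.1
        let k := st.2.2
        let cur := if ch = 'a' ∨ ch = 'e' ∨ ch = 'i' ∨ ch = 'o' ∨ ch = 'u' then cur + k + 1 else cur
        (total + cur, cur, k + 1))
      (total, cur, k)).1 = total + (t.length : Int) * cur + gAux k t := by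
  induction t with
  | nil => intro total cur k; simp [gAux]
  | cons c t ih =>
      intro total cur k
      simp only [List.foldl_cons, gAux]
      by_cases h : c = 'a' ∨ c = 'e' ∨ c = 'i' ∨ c = 'o' ∨ c = 'u' <;>
        simp only [h, if_true, if_false, ih, List.length_cons] <;> push_cast <;> ring

theorem a_foldl_eq (suf : List Char) : ∀ (pre : List Char) (s : Int), ∀ (l : List Char), l = pre ++ suf →
    ((PySem.List.pyRange (pre.length : Int) (l.length : Int) 1).foldl
      (fun sum i =>
        match PySem.List.pyGet? l i with
        | some c =>
            if c = 'a' ∨ c = 'e' ∨ c = 'i' ∨ c = 'o' ∨ c = 'u' then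
              sum + ((l.length : Int) - i) * (i + 1)
            else sum
        | none => sum)
      s) = s + gAux (pre.length : Int) suf := by
  induction suf with
  | nil =>
      intro pre s l hl
      subst hl
      rw [PySem.List.pyRange_one_eq_nil (by simp)]
      simp [gAux]
  | cons c t ih =>
      intro pre s l hl
      subst hl
      have hlen : ((pre ++ c :: t).length : Int) = (pre.length : Int) + (t.length : Int) + 1 := by
        push_cast [List.length_append, List.length_cons]; ring
      rw [PySem.List.pyRange_one_cons (by omega)]
      simp only [List.foldl_cons, PySem.List.pyGet?_append_length]
      have step := ih (pre ++ [c]) (s + (if c = 'a' ∨ c = 'e' ∨ c = 'i' ∨ c = 'o' ∨ c = 'u'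
          then (((pre ++ c :: t).length : Int) - (pre.length : Int)) * ((pre.length : Int) + 1) else 0))
        (pre ++ c :: t) (by simp)
      have hlen2 : (((pre ++ [c]).length : Int)) = (pre.length : Int) + 1 := by
        simp
      rw [hlen2] at step
      by_cases h : c = 'a' ∨ c = 'e' ∨ c = 'i' ∨ c = 'o' ∨ c = 'u'
      · simp only [h, if_true] at step ⊢
        rw [step, gAux]
        simp only [h, if_true]
        rw [hlen]
        ring
      · simp only [h, if_false] at step ⊢
        rw [gAux]
        simp only [h, if_false]
        rw [show s + 0 = s by ring] at step
        rw [step]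
        ring

-- ===== VERDICT (by name: the statement is the Claim_ definition above) =====
theorem sumVowel_spec : Claim_equal_sumVowel := by
  intro string _
  unfold Spec_sumVowel sumVowel sumVowel_alt
  have hlen : PySem.Str.len string = (((PySem.Str.lower string).toList).length : Int) := by
    simp [PySem.Str.toList_lower, PySem.Chars.lower]
  have hget : ∀ i, PySem.Str.pyGet? (PySem.Str.lower string) i
      = PySem.List.pyGet? (PySem.Str.lower string).toList i := by
    intro i; simp
  simp only [hlen, hget]
  have ha := a_foldl_eq (PySem.Str.lower string).toList [] 0 (PySem.Str.lower string).toList (by simp)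
  simp only [List.length_nil, Nat.cast_zero] at ha
  rw [ha]
  have hb := alt_foldl_eq (PySem.Str.lower string).toList 0 0 0
  rw [hb]
  ring
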